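-- pv_equiv track=rewrite | github.com/isndotbiz/ged | tools/cli/gedfix/places.py | capitalize_place_name
-- ===== SOURCE A (Python) =====
-- def capitalize_place_name(name: str) -> str:
--     """Capitalize place names according to geographical conventions."""
--     if not name:
--         return name
--
--     # Handle hyphenated place names
--     if '-' in name:
--         parts = name.split('-')
--         return '-'.join([capitalize_place_name(part) for part in parts])
--
--     # Handle names with apostrophes
--     if "'" in name:
--         parts = name.split("'")
--         return "'".join([capitalize_place_name(part) for part in parts])
--
--     # Special cases for geographical terms
--     words = name.split()
--     capitalized_words = []
--
--     for word in words:
--         lower_word = word.lower()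
--
--         # Keep certain words lowercase unless they're the first word
--         if lower_word in ['of', 'the', 'and', 'in', 'on', 'at', 'by', 'for', 'with']:
--             if len(capitalized_words) == 0:  # First word
--                 capitalized_words.append(word.capitalize())
--             else:
--                 capitalized_words.append(lower_word)
--         else:
--             capitalized_words.append(word.capitalize())
--
--     return ' '.join(capitalized_words)
-- ===== SOURCE B (Python) =====
-- def capitalize_place_name(name: str) -> str:
--     """Capitalize place names according to geographical conventions.
--
--     Single left-to-right scan: tokenize on '-' and "'" in one pass (keeping
--     the delimiters in place), capitalize each delimiter-free segment."""
--     stop = {'of', 'the', 'and', 'in', 'on', 'at', 'by', 'for', 'with'}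
--
--     def fix_segment(seg):
--         words = ''.join(seg).split()
--         fixed = [w.capitalize() if (w.lower() not in stop or i == 0) else w.lower()
--                  for i, w in enumerate(words)]
--         return ' '.join(fixed)
--
--     out = []
--     seg = []
--     for ch in name:
--         if ch == '-' or ch == "'":
--             out.append(fix_segment(seg))
--             out.append(ch)
--             seg = []
--         else:
--             seg.append(ch)
--     out.append(fix_segment(seg))
--     return ''.join(out)
-- ===== Notes on version B (the rewrite author's own statement) =====
-- stated objective: alternative
-- what changed: Replaces A's recursive split on hyphens and then on apostrophes (with a per-level join) by a single left-to-right scan that tokenizes on both delimiters in one pass and capitalizes each delimiter-free segment with an enumerate-based word pass.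
import Mathlib
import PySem

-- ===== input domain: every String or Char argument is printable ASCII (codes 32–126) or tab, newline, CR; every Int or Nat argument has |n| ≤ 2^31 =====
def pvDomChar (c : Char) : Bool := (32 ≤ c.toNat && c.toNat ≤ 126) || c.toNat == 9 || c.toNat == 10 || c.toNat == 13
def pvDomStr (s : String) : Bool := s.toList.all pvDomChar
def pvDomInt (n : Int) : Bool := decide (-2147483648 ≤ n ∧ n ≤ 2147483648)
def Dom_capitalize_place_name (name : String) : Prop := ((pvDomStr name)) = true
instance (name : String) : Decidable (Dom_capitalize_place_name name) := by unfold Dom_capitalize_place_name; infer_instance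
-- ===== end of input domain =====

-- B replaces A's recursive split-on-'-'-then-split-on-apostrophe with one flat left-to-right
-- tokenization pass over the characters; objective: alternative decomposition (same result).

-- ===== PORT A =====
-- shared literal constant of both Pythons: the stopword list (A: list, B: set — membership agrees)
def pvStopwords : List (List Char) :=
  ["of", "the", "and", "in", "on", "at", "by", "for", "with"].map String.toList

-- w.capitalize(): first char title-cased, rest lowered — exact on the ASCII domain
def pvCapWord (w : List Char) : List Char :=
  match w with
  | [] => []
  | c :: cs => PySem.Chars.upperChar c :: PySem.Chars.lower cs

-- A's 'for word in words' loop over the accumulator capitalized_words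
def pvLoopA : List (List Char) → List (List Char) → List (List Char)
  | [], acc => acc
  | w :: ws, acc =>
    let lw := PySem.Chars.lower w
    pvLoopA ws (acc ++ [if lw ∈ pvStopwords then
                          (if acc.length = 0 then pvCapWord w else lw)
                        else pvCapWord w])

def pvWordPassA (s : List Char) : List Char :=
  PySem.Chars.join [' '] (pvLoopA (PySem.Chars.split₀ s) [])

-- A's recursion; fuel only makes totality explicit: the recursion depth is ≤ 3 because
-- split parts never contain the separator again (the 0 case is never reached).
def pvCapAgo : Nat → List Char → List Char
  | 0, _ => []
  | fuel + 1, s =>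
    if s = [] then s
    else if PySem.Chars.isIn ['-'] s then
      PySem.Chars.join ['-'] ((PySem.Chars.splitOn s ['-']).map (pvCapAgo fuel))
    else if PySem.Chars.isIn ['\''] s then
      PySem.Chars.join ['\''] ((PySem.Chars.splitOn s ['\'']).map (pvCapAgo fuel))
    else pvWordPassA s

def capitalize_place_name (name : String) : String :=
  String.ofList (pvCapAgo 3 name.toList)

-- ===== PORT B =====
-- B's fix_segment: one comprehension over enumerate(words)
def pvFixSeg (seg : List Char) : List Char :=
  PySem.Chars.join [' ']
    ((PySem.List.enumerate (PySem.Chars.split₀ seg)).map fun p =>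
      if PySem.Chars.lower p.2 ∉ pvStopwords ∨ p.1 = 0 then pvCapWord p.2
      else PySem.Chars.lower p.2)

-- B's single scan over the characters (state: current segment, output chunks)
def pvBGo : List Char → List Char → List (List Char) → List Char
  | [], seg, out => PySem.Chars.join [] (out ++ [pvFixSeg seg])
  | c :: cs, seg, out =>
    if c = '-' ∨ c = '\'' then pvBGo cs [] (out ++ [pvFixSeg seg, [c]])
    else pvBGo cs (seg ++ [c]) out

def capitalize_place_name_alt (name : String) : String :=
  String.ofList (pvBGo name.toList [] [])

-- ===== PRECONDITION & SPEC =====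
def Spec_capitalize_place_name (name : String) (out : String) : Prop := out = capitalize_place_name_alt name
instance (name : String) (out : String) : Decidable (Spec_capitalize_place_name name out) := by unfold Spec_capitalize_place_name; infer_instance

-- ===== CLAIM (what is proved, stated in full; the proofs are below) =====
def Claim_equal_capitalize_place_name : Prop := ∀ (name : String), Dom_capitalize_place_name name → Spec_capitalize_place_name name (capitalize_place_name name)

-- ===== LEMMAS AND PROOFS =====

def pvSplitC (d : Char) : List Char → List (List Char)
  | [] => [[]]
  | c :: cs =>
    if c = d then [] :: pvSplitC d cs
    else
      match pvSplitC d cs with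
      | [] => [[c]]
      | p :: ps => (c :: p) :: ps

def pvMapHead (f : List Char → List Char) : List (List Char) → List (List Char)
  | [] => []
  | p :: ps => f p :: ps

theorem pvSplitC_ne_nil (d : Char) (s : List Char) : pvSplitC d s ≠ [] := by
  induction s with
  | nil => simp [pvSplitC]
  | cons c cs ih =>
    simp only [pvSplitC]
    split
    · simp
    · split
      · simp
      · simp

theorem pvSplitOn_go (d : Char) (fuel : Nat) :
    ∀ (l cur : List Char) (acc : List (List Char)), l.length ≤ fuel →
    PySem.Chars.splitOn.go [d] fuel l cur acc =
      acc.reverse ++ pvMapHead (cur.reverse ++ ·) (pvSplitC d l) := by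
  induction fuel with
  | zero =>
    intro l cur acc h
    have : l = [] := by cases l <;> simp_all
    subst this
    simp [PySem.Chars.splitOn.go, pvSplitC, pvMapHead]
  | succ fuel ih =>
    intro l cur acc h
    cases l with
    | nil => simp [PySem.Chars.splitOn.go, pvSplitC, pvMapHead]
    | cons c rest =>
      have hpre : [d].isPrefixOf (c :: rest) = (d == c) := by
        simp [List.isPrefixOf]
      simp only [PySem.Chars.splitOn.go, hpre]
      by_cases hc : d = c
      · rw [if_pos (by simp [hc])]
        simp only [List.length_singleton, List.drop_one, List.tail_cons]
        rw [ih rest [] _ (by simpa using Nat.le_of_succ_le_succ (by simpa using h))]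
        subst hc
        simp only [pvSplitC, if_pos rfl, pvMapHead, List.reverse_cons, List.reverse_nil,
          List.nil_append, List.append_assoc, List.singleton_append]
        cases hsp : pvSplitC d rest with
        | nil => exact absurd hsp (pvSplitC_ne_nil d rest)
        | cons p ps => simp [pvMapHead]
      · rw [if_neg (by simp; exact fun h' => hc h')]
        rw [ih rest (c :: cur) _ (by simpa using Nat.le_of_succ_le_succ (by simpa using h))]
        have hcd : ¬ c = d := fun h' => hc h'.symm
        simp only [pvSplitC, if_neg hcd]
        cases hsp : pvSplitC d rest with
        | nil => exact absurd hsp (pvSplitC_ne_nil d rest)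
        | cons p ps => simp [pvMapHead, List.reverse_cons]

theorem pvSplitOn_eq (d : Char) (s : List Char) :
    PySem.Chars.splitOn s [d] = pvSplitC d s := by
  rw [PySem.Chars.splitOn, pvSplitOn_go d _ s [] [] (by omega)]
  cases hsp : pvSplitC d s with
  | nil => exact absurd hsp (pvSplitC_ne_nil d s)
  | cons p ps => simp [pvMapHead]

theorem pvIsIn_single (d : Char) (s : List Char) :
    PySem.Chars.isIn [d] s = true ↔ d ∈ s := by
  rw [PySem.Chars.isIn_iff_infix]
  constructor
  · intro h; exact h.subset (by simp)
  · intro h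
    obtain ⟨a, b, rfl⟩ := List.append_of_mem h
    exact ⟨a, b, by simp⟩

theorem pvMem_splitC_not_mem {d : Char} {s p : List Char} (h : p ∈ pvSplitC d s) : d ∉ p := by
  induction s generalizing p with
  | nil => simp [pvSplitC] at h; simp [h]
  | cons c cs ih =>
    simp only [pvSplitC] at h
    by_cases hc : c = d
    · rw [if_pos hc] at h
      rcases List.mem_cons.mp h with h | h
      · simp [h]
      · exact ih h
    · rw [if_neg hc] at h
      cases hsp : pvSplitC d cs with
      | nil => exact absurd hsp (pvSplitC_ne_nil d cs)
      | cons q qs =>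
        rw [hsp] at h
        rcases List.mem_cons.mp h with h | h
        · subst h
          have : d ∉ q := ih (by simp [hsp])
          simp [Ne.symm hc, this]
        · exact ih (by simp [hsp, h])

theorem pvMem_splitC_subset {d : Char} {s p : List Char} (h : p ∈ pvSplitC d s)
    {c : Char} (hc : c ∈ p) : c ∈ s := by
  induction s generalizing p with
  | nil => simp [pvSplitC] at h; subst h; simp at hc
  | cons c' cs ih =>
    simp only [pvSplitC] at h
    by_cases hcd : c' = d
    · rw [if_pos hcd] at h
      rcases List.mem_cons.mp h with h | h
      · subst h; simp at hc
      · exact List.mem_cons_of_mem _ (ih h hc)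
    · rw [if_neg hcd] at h
      cases hsp : pvSplitC d cs with
      | nil => exact absurd hsp (pvSplitC_ne_nil d cs)
      | cons q qs =>
        rw [hsp] at h
        rcases List.mem_cons.mp h with h | h
        · subst h
          rcases List.mem_cons.mp hc with rfl | hc
          · simp
          · exact List.mem_cons_of_mem _ (ih (by simp [hsp]) hc)
        · exact List.mem_cons_of_mem _ (ih (by simp [hsp, h]) hc)

theorem pvSplitC_append {d : Char} {a : List Char} (ha : d ∉ a) (t : List Char) :
    pvSplitC d (a ++ t) = pvMapHead (a ++ ·) (pvSplitC d t) := by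
  induction a with
  | nil =>
    rw [List.nil_append]
    cases hsp : pvSplitC d t with
    | nil => exact absurd hsp (pvSplitC_ne_nil d t)
    | cons p ps => simp [pvMapHead]
  | cons c cs ih =>
    have hc : ¬ c = d := by simp at ha; exact fun h' => ha.1 h'.symm
    have hcs : d ∉ cs := by simp at ha; exact ha.2
    simp only [List.cons_append, pvSplitC, if_neg hc, ih hcs]
    cases hsp : pvSplitC d t with
    | nil => exact absurd hsp (pvSplitC_ne_nil d t)
    | cons p ps => simp [pvMapHead]

theorem pvSplitC_of_not_mem {d : Char} {s : List Char} (h : d ∉ s) :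
    pvSplitC d s = [s] := by
  have := pvSplitC_append h ([] : List Char)
  simpa [pvSplitC, pvMapHead] using this

def pvStep (w : List Char) : List Char :=
  if PySem.Chars.lower w ∈ pvStopwords then PySem.Chars.lower w else pvCapWord w

def pvFix (s : List Char) : List Char :=
  PySem.Chars.join [' ']
    (match PySem.Chars.split₀ s with
     | [] => []
     | w :: ws => pvCapWord w :: ws.map pvStep)

theorem pvLoopA_acc (ws : List (List Char)) : ∀ (acc : List (List Char)), acc ≠ [] →
    pvLoopA ws acc = acc ++ ws.map pvStep := by
  induction ws with
  | nil => intro acc _; simp [pvLoopA]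
  | cons w ws ih =>
    intro acc hacc
    rw [pvLoopA]
    rw [ih _ (by simp)]
    have hlen : ¬ acc.length = 0 := by simpa using hacc
    simp only [if_neg hlen, List.append_assoc, List.singleton_append]
    rfl

theorem pvWordPassA_eq_fix (s : List Char) : pvWordPassA s = pvFix s := by
  unfold pvWordPassA pvFix
  cases hsp : PySem.Chars.split₀ s with
  | nil => simp [pvLoopA]
  | cons w ws =>
    congr 1
    have h0 : pvLoopA (w :: ws) [] = pvLoopA ws [pvCapWord w] := by
      simp only [pvLoopA, List.nil_append, List.length_nil]
      congr 1
      split <;> simp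
    rw [h0, pvLoopA_acc ws [pvCapWord w] (by simp)]
    simp

theorem pvEnumMap_step (ws : List (List Char)) : ∀ (n : Int), 1 ≤ n →
    (PySem.List.enumerate ws n).map (fun p =>
      if PySem.Chars.lower p.2 ∉ pvStopwords ∨ p.1 = 0 then pvCapWord p.2
      else PySem.Chars.lower p.2) = ws.map pvStep := by
  induction ws with
  | nil => intro n _; simp [PySem.List.enumerate_nil]
  | cons w ws ih =>
    intro n hn
    rw [PySem.List.enumerate_cons, List.map_cons, ih (n+1) (by omega), List.map_cons]
    congr 1
    simp only [pvStep]
    by_cases hmem : PySem.Chars.lower w ∈ pvStopwords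
    · rw [if_neg, if_pos hmem]
      push Not
      exact ⟨hmem, by omega⟩
    · rw [if_pos (Or.inl hmem), if_neg hmem]

theorem pvFixSeg_eq_fix (s : List Char) : pvFixSeg s = pvFix s := by
  unfold pvFixSeg pvFix
  cases hsp : PySem.Chars.split₀ s with
  | nil => simp [PySem.List.enumerate_nil]
  | cons w ws =>
    rw [PySem.List.enumerate_cons, List.map_cons]
    norm_num
    rw [pvEnumMap_step ws 1 (by omega)]

def pvSpec2 (p : List Char) : List Char :=
  PySem.Chars.join ['\''] ((pvSplitC '\'' p).map pvFix)

def pvSpec (s : List Char) : List Char :=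
  PySem.Chars.join ['-'] ((pvSplitC '-' s).map pvSpec2)

theorem pvSpec2_of_no_apos {p : List Char} (h : '\'' ∉ p) : pvSpec2 p = pvFix p := by
  rw [pvSpec2, pvSplitC_of_not_mem h]
  simp [PySem.Chars.join_singleton]

theorem pvSpec_of_free {s : List Char} (h : '-' ∉ s) : pvSpec s = pvSpec2 s := by
  rw [pvSpec, pvSplitC_of_not_mem h]
  simp [PySem.Chars.join_singleton]

theorem pvJoin_cons_append (sep a x : List Char) (l : List (List Char)) :
    PySem.Chars.join sep ((a ++ x) :: l) = a ++ PySem.Chars.join sep (x :: l) := by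
  cases l with
  | nil => simp [PySem.Chars.join_singleton]
  | cons y l => simp [PySem.Chars.join_cons_cons, List.append_assoc]

theorem pvSpec2_cons {seg : List Char} (h2 : '\'' ∉ seg) (p : List Char) :
    pvSpec2 (seg ++ '\'' :: p) = pvFix seg ++ '\'' :: pvSpec2 p := by
  rw [pvSpec2, pvSplitC_append h2 ('\'' :: p)]
  have h3 : pvSplitC '\'' ('\'' :: p) = [] :: pvSplitC '\'' p := by simp [pvSplitC]
  rw [h3]
  cases hsp : pvSplitC '\'' p with
  | nil => exact absurd hsp (pvSplitC_ne_nil _ p)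
  | cons q qs =>
    simp only [pvMapHead, List.map_cons, List.nil_append, List.append_nil]
    rw [PySem.Chars.join_cons_cons, pvSpec2, hsp, List.map_cons]
    simp

theorem pvSpec_cons_delim {seg : List Char} (h1 : '-' ∉ seg) (h2 : '\'' ∉ seg)
    {c : Char} (hc : c = '-' ∨ c = '\'') (t : List Char) :
    pvSpec (seg ++ c :: t) = pvFix seg ++ c :: pvSpec t := by
  rcases hc with rfl | rfl
  · rw [pvSpec, pvSplitC_append h1 ('-' :: t)]
    have h3 : pvSplitC '-' ('-' :: t) = [] :: pvSplitC '-' t := by simp [pvSplitC]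
    rw [h3]
    cases hsp : pvSplitC '-' t with
    | nil => exact absurd hsp (pvSplitC_ne_nil _ t)
    | cons p ps =>
      simp only [pvMapHead, List.map_cons, List.nil_append, List.append_nil]
      rw [PySem.Chars.join_cons_cons, pvSpec2_of_no_apos h2, pvSpec, hsp, List.map_cons]
      simp
  · rw [pvSpec, show seg ++ '\'' :: t = (seg ++ ['\'']) ++ t from by simp,
      pvSplitC_append (d := '-') (a := seg ++ ['\'']) (by simp [h1]) t]
    cases hsp : pvSplitC '-' t with
    | nil => exact absurd hsp (pvSplitC_ne_nil _ t)
    | cons p ps =>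
      simp only [pvMapHead, List.map_cons, List.append_assoc, List.singleton_append]
      rw [pvSpec2_cons h2 p, pvSpec, hsp, List.map_cons,
        show pvFix seg ++ '\'' :: pvSpec2 p = (pvFix seg ++ ['\'']) ++ pvSpec2 p from by simp,
        pvJoin_cons_append]
      simp

theorem pvIsIn_false {d : Char} {s : List Char} (h : d ∉ s) :
    PySem.Chars.isIn [d] s = false := by
  rw [← Bool.not_eq_true]
  exact fun hc => h ((pvIsIn_single d s).mp hc)

theorem pvCapA1 {q : List Char} (h1 : '-' ∉ q) (h2 : '\'' ∉ q) :
    pvCapAgo 1 q = pvFix q := by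
  by_cases hq : q = []
  · subst hq; decide
  · rw [pvCapAgo]
    simp [hq, pvIsIn_false h1, pvIsIn_false h2, pvWordPassA_eq_fix]

theorem pvCapA2 {p : List Char} (h1 : '-' ∉ p) : pvCapAgo 2 p = pvSpec2 p := by
  by_cases hp : p = []
  · subst hp; decide
  · by_cases hap : '\'' ∈ p
    · have : PySem.Chars.isIn ['\''] p = true := (pvIsIn_single _ _).mpr hap
      rw [pvCapAgo]
      simp only [if_neg hp, pvIsIn_false h1, Bool.false_eq_true, if_false, this,
        if_true, pvSplitOn_eq]
      rw [pvSpec2]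
      congr 1
      apply List.map_congr_left
      intro q hq
      exact pvCapA1 (fun hc => h1 (pvMem_splitC_subset hq hc)) (pvMem_splitC_not_mem hq)
    · rw [pvCapAgo]
      simp [hp, pvIsIn_false h1, pvIsIn_false hap, pvWordPassA_eq_fix,
        pvSpec2_of_no_apos hap]

theorem pvCapA_eq_spec (s : List Char) : pvCapAgo 3 s = pvSpec s := by
  by_cases hnil : s = []
  · subst hnil; decide
  · by_cases hdash : '-' ∈ s
    · have : PySem.Chars.isIn ['-'] s = true := (pvIsIn_single _ _).mpr hdash
      rw [pvCapAgo]
      simp only [if_neg hnil, this, if_true, pvSplitOn_eq]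
      rw [pvSpec]
      congr 1
      apply List.map_congr_left
      intro p hp
      exact pvCapA2 (pvMem_splitC_not_mem hp)
    · rw [pvSpec_of_free hdash]
      by_cases hap : '\'' ∈ s
      · have : PySem.Chars.isIn ['\''] s = true := (pvIsIn_single _ _).mpr hap
        rw [pvCapAgo]
        simp only [if_neg hnil, pvIsIn_false hdash, Bool.false_eq_true, if_false,
          this, if_true, pvSplitOn_eq]
        rw [pvSpec2]
        congr 1
        apply List.map_congr_left
        intro q hq
        exact (pvCapA2 (fun hc => hdash (pvMem_splitC_subset hq hc))).trans
          (pvSpec2_of_no_apos (pvMem_splitC_not_mem hq))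
      · rw [pvCapAgo]
        simp [hnil, pvIsIn_false hdash, pvIsIn_false hap, pvWordPassA_eq_fix,
          pvSpec2_of_no_apos hap]

theorem pvJoin_nil_sep (l : List (List Char)) :
    PySem.Chars.join [] l = l.flatten := by
  induction l with
  | nil => simp [PySem.Chars.join_nil]
  | cons x l ih =>
    cases l with
    | nil => simp [PySem.Chars.join_singleton]
    | cons y l => rw [PySem.Chars.join_cons_cons] at *; simp_all

theorem pvBGo_eq (cs : List Char) : ∀ (seg : List Char) (out : List (List Char)),
    '-' ∉ seg → '\'' ∉ seg →
    pvBGo cs seg out = (out.flatten) ++ pvSpec (seg ++ cs) := by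
  induction cs with
  | nil =>
    intro seg out h1 h2
    rw [pvBGo, pvJoin_nil_sep, List.append_nil,
      pvSpec_of_free h1, pvSpec2_of_no_apos h2, pvFixSeg_eq_fix]
    simp
  | cons c cs ih =>
    intro seg out h1 h2
    rw [pvBGo]
    by_cases hc : c = '-' ∨ c = '\''
    · rw [if_pos hc, ih [] _ (by simp) (by simp), pvSpec_cons_delim h1 h2 hc cs,
        pvFixSeg_eq_fix]
      simp
    · rw [if_neg hc]
      push Not at hc
      rw [ih (seg ++ [c]) out (by simp [h1]; exact fun h => hc.1 h.symm) (by simp [h2]; exact fun h => hc.2 h.symm)]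
      simp

-- ===== VERDICT (by name: the statement is the Claim_ definition above) =====
theorem capitalize_place_name_spec : Claim_equal_capitalize_place_name := by
  intro name _
  unfold Spec_capitalize_place_name capitalize_place_name capitalize_place_name_alt
  rw [pvCapA_eq_spec, pvBGo_eq name.toList [] [] (by simp) (by simp)]
  simp
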